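-- pv_equiv track=rewrite | github.com/absognety/Competitive-Coding-Platforms | GCC-2019/ContinuousSeries.py | continuousSeries
-- ===== SOURCE A (Python) =====
-- def continuousSeries(arr,n):
--     req=[]
--     el = 0
--     for i in range(1,n):
--         if arr[i] - arr[el] == 1:
--             if len(req) == 0:
--                 req.append([arr[el],arr[i]])
--                 el += 1
--
--             else:
--                 req[-1].extend([arr[el],arr[i]])
--                 el += 1
--         else:
--             if len(req) != 0:
--                 req.append([])
--             el += 1
--             continue
--     if len(req) == 0:
--         return 0
--     elif len(req) > 0:
--         ans = [i for i in req if len(i) > 0]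
--         return len(ans)
-- ===== SOURCE B (Python) =====
-- def continuousSeries(arr, n):
--     # phase 1: boolean step sequence; phase 2: count rising edges (= run starts)
--     steps = [arr[i] - arr[i - 1] == 1 for i in range(1, n)]
--     return sum(1 for prev, cur in zip([False] + steps, steps) if cur and not prev)
-- ===== Notes on version B (the rewrite author's own statement) =====
-- stated objective: simpler
-- what changed: A maintains a list of group-lists (appending, extending the last group, inserting empty separators) and finally counts the nonempty groups; B instead builds the boolean step sequence arr[i]-arr[i-1]==1 and counts its rising edges (run starts) with a zip over the sequence and its shift.
import Mathlib
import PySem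

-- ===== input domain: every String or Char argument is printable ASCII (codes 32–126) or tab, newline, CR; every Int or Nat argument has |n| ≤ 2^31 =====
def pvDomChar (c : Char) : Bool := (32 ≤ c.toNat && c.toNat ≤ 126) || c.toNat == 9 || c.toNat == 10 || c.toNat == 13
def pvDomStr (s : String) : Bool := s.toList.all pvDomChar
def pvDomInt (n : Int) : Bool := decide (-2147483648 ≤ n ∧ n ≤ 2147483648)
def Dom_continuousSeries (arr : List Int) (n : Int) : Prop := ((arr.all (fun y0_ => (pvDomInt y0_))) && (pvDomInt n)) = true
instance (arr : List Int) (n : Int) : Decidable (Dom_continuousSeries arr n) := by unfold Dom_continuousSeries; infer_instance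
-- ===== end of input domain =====

-- B replaces A's list-of-groups bookkeeping by a two-phase edge count (build boolean step
-- sequence, count rising edges); objective: simpler, same O(n) cost.

-- ===== PORT A =====
-- one loop iteration of A: state is (req, el)
def aStep (arr : List Int) (st : List (List Int) × Int) (i : Int) : List (List Int) × Int :=
  let req := st.1
  let el := st.2
  if PySem.List.pyGetD arr i 0 - PySem.List.pyGetD arr el 0 == 1 then
    if req.length == 0 then
      (req ++ [[PySem.List.pyGetD arr el 0, PySem.List.pyGetD arr i 0]], el + 1)
    else
      (req.dropLast ++ [req.getLast! ++ [PySem.List.pyGetD arr el 0, PySem.List.pyGetD arr i 0]], el + 1)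
  else
    if req.length != 0 then (req ++ ([] : List Int) :: [], el + 1)
    else (req, el + 1)

def continuousSeries (arr : List Int) (n : Int) : Int :=
  let res := (PySem.List.pyRange 1 n 1).foldl (aStep arr) ([], 0)
  let req := res.1
  if req.length == 0 then 0
  else ((req.filter (fun l => decide (0 < l.length))).length : Int)

-- ===== PORT B =====
def continuousSeries_alt (arr : List Int) (n : Int) : Int :=
  let steps := (PySem.List.pyRange 1 n 1).map
    (fun i => PySem.List.pyGetD arr i 0 - PySem.List.pyGetD arr (i - 1) 0 == 1)
  ((((false :: steps).zip steps).filter (fun p => p.2 && !p.1)).length : Int)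

-- ===== PRECONDITION & SPEC =====
-- Pre_ excludes exactly the inputs where the Python A raises IndexError: n ≥ 2 with n > len(arr)
def Pre_continuousSeries (arr : List Int) (n : Int) : Prop := n ≤ 1 ∨ n ≤ (arr.length : Int)
instance (arr : List Int) (n : Int) : Decidable (Pre_continuousSeries arr n) := by unfold Pre_continuousSeries; infer_instance
def pvWitness_continuousSeries : List Int × Int := ([1, 2, 3, 7, 8], 5)

def Spec_continuousSeries (arr : List Int) (n : Int) (out : Int) : Prop := out = continuousSeries_alt arr n
instance (arr : List Int) (n : Int) (out : Int) : Decidable (Spec_continuousSeries arr n out) := by unfold Spec_continuousSeries; infer_instance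

-- ===== CLAIM (what is proved, stated in full; the proofs are below) =====
def Claim_equal_continuousSeries : Prop := ∀ (arr : List Int) (n : Int), Dom_continuousSeries arr n → Pre_continuousSeries arr n → Spec_continuousSeries arr n (continuousSeries arr n)

-- ===== LEMMAS AND PROOFS =====

-- number of nonempty groups in A's req
def finalCount (req : List (List Int)) : Nat := (req.filter (fun l => decide (0 < l.length))).length
-- whether the last group of req is nonempty
def lastNE (req : List (List Int)) : Bool := match req.getLast? with | none => false | some l => !l.isEmpty
-- B's rising-edge count, with an explicit previous bit
def zipCount (prev : Bool) (s : List Bool) : Nat := (((prev :: s).zip s).filter (fun p => p.2 && !p.1)).length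
-- l is the consecutive run s, s+1, …
def consec : List Int → Int → Prop
  | [], _ => True
  | x :: t, s => x = s ∧ consec t (s + 1)

lemma zipCount_nil (prev : Bool) : zipCount prev [] = 0 := by simp [zipCount]

lemma zipCount_cons (prev b : Bool) (t : List Bool) :
    zipCount prev (b :: t) = (if b && !prev then 1 else 0) + zipCount b t := by
  unfold zipCount
  rw [List.zip_cons_cons, List.filter_cons]
  by_cases hc : b = true ∧ prev = false
  · simp [hc, Nat.add_comm]
  · simp [hc]

lemma consec_pyRange_nat (m : Nat) : ∀ a : Int, consec (PySem.List.pyRange a (a + m) 1) a := by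
  induction m with
  | zero => intro a; rw [PySem.List.pyRange_one_eq_nil (by omega)]; trivial
  | succ k ih =>
    intro a
    rw [PySem.List.pyRange_one_cons (by omega)]
    refine ⟨rfl, ?_⟩
    have h : a + ((k : Int) + 1) = (a + 1) + k := by ring
    have := ih (a + 1)
    rw [show ((k + 1 : Nat) : Int) = (k : Int) + 1 by push_cast; ring, h]
    exact this

lemma consec_pyRange (a b : Int) : consec (PySem.List.pyRange a b 1) a := by
  by_cases h : b ≤ a
  · rw [PySem.List.pyRange_one_eq_nil h]; trivial
  · have hb : b = a + ((b - a).toNat : Int) := by omega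
    rw [hb]; exact consec_pyRange_nat _ a

lemma finalCount_append_singleton (xs : List (List Int)) (y : List Int) :
    finalCount (xs ++ [y]) = finalCount xs + (if 0 < y.length then 1 else 0) := by
  unfold finalCount
  rw [List.filter_append]
  by_cases h : 0 < y.length <;> simp [h]

lemma lastNE_append_singleton (xs : List (List Int)) (y : List Int) :
    lastNE (xs ++ [y]) = !y.isEmpty := by
  unfold lastNE
  rw [List.getLast?_concat]

lemma decomp_cons (r : List Int) (rs : List (List Int)) :
    (r :: rs).dropLast ++ [(r :: rs).getLast!] = r :: rs :=
  List.dropLast_append_getLast? (r :: rs).getLast! rfl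

lemma aFold_count (arr : List Int) :
    ∀ (l : List Int) (el : Int) (req : List (List Int)), consec l (el + 1) →
      finalCount ((l.foldl (aStep arr) (req, el)).1)
        = finalCount req + zipCount (lastNE req)
            (l.map (fun i => PySem.List.pyGetD arr i 0 - PySem.List.pyGetD arr (i - 1) 0 == 1)) := by
  intro l
  induction l with
  | nil => intro el req _; simp [zipCount_nil]
  | cons i t ih =>
    intro el req hc
    obtain ⟨hi, hct⟩ := hc
    subst hi
    simp only [List.foldl_cons, List.map_cons]
    have hidx : el + 1 - 1 = el := by ring
    rw [hidx, zipCount_cons]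
    by_cases hb : PySem.List.pyGetD arr (el + 1) 0 - PySem.List.pyGetD arr el 0 = 1
    · -- step bit is true
      rcases req with _ | ⟨r, rs⟩
      · -- req = []
        have hstep : aStep arr ([], el) (el + 1)
            = ([[PySem.List.pyGetD arr el 0, PySem.List.pyGetD arr (el + 1) 0]], el + 1) := by
          simp [aStep, hb]
        rw [hstep, ih (el + 1) _ hct]
        simp [finalCount, lastNE, hb]
      · -- req nonempty: extend last group
        have hstep : aStep arr (r :: rs, el) (el + 1)
            = ((r :: rs).dropLast ++ [(r :: rs).getLast! ++ [PySem.List.pyGetD arr el 0, PySem.List.pyGetD arr (el + 1) 0]], el + 1) := by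
          simp [aStep, hb]
        rw [hstep, ih (el + 1) _ hct]
        have h1 := finalCount_append_singleton ((r :: rs).dropLast)
          ((r :: rs).getLast! ++ [PySem.List.pyGetD arr el 0, PySem.List.pyGetD arr (el + 1) 0])
        have h2 := lastNE_append_singleton ((r :: rs).dropLast)
          ((r :: rs).getLast! ++ [PySem.List.pyGetD arr el 0, PySem.List.pyGetD arr (el + 1) 0])
        have hdec := decomp_cons r rs
        have h3 : finalCount (r :: rs)
            = finalCount ((r :: rs).dropLast) + (if 0 < ((r :: rs).getLast!).length then 1 else 0) := by
          conv_lhs => rw [← hdec]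
          exact finalCount_append_singleton _ _
        have h4 : lastNE (r :: rs) = !((r :: rs).getLast!).isEmpty := by
          conv_lhs => rw [← hdec]
          exact lastNE_append_singleton _ _
        have hbit : (PySem.List.pyGetD arr (el + 1) 0 - PySem.List.pyGetD arr el 0 == 1) = true := by
          simp [hb]
        rw [h1, h2, h3, h4, hbit]
        cases hgl : (r :: rs).getLast! with
        | nil => simp; omega
        | cons a b => simp
    · -- step bit is false
      have hbit : (PySem.List.pyGetD arr (el + 1) 0 - PySem.List.pyGetD arr el 0 == 1) = false := by
        simp [hb]
      rcases req with _ | ⟨r, rs⟩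
      · have hstep : aStep arr ([], el) (el + 1) = ([], el + 1) := by
          simp [aStep, hb]
        rw [hstep, ih (el + 1) _ hct, hbit]
        simp [lastNE]
      · have hstep : aStep arr (r :: rs, el) (el + 1) = ((r :: rs) ++ [[]], el + 1) := by
          simp [aStep, hb]
        rw [hstep, ih (el + 1) _ hct, hbit]
        rw [finalCount_append_singleton, lastNE_append_singleton]
        simp

-- ===== VERDICT (by name: the statement is the Claim_ definition above) =====
theorem continuousSeries_spec : Claim_equal_continuousSeries := by
  unfold Claim_equal_continuousSeries
  intro arr n _ _
  unfold Spec_continuousSeries continuousSeries continuousSeries_alt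
  have h := aFold_count arr (PySem.List.pyRange 1 n 1) 0 []
    (by simpa using consec_pyRange 1 n)
  simp only [finalCount, lastNE, List.getLast?_nil, List.filter_nil, List.length_nil,
    Nat.zero_add, zipCount] at h
  by_cases h0 : ((PySem.List.pyRange 1 n 1).foldl (aStep arr) ([], 0)).1.length = 0
  · have hnil := List.length_eq_zero_iff.mp h0
    rw [hnil] at h
    simp only [List.filter_nil, List.length_nil] at h
    simp only [beq_iff_eq, h0, if_true]
    exact_mod_cast h
  · simp only [beq_iff_eq, h0, if_false]
    exact_mod_cast h
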